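-- pv_equiv track=rewrite | github.com/taliamekh/DeskClaw | OpenClaw/voice_client.py | check_rolling_buffer
-- ===== SOURCE A (Python) =====
-- WAKE_PHRASES = [
--     "hey claw", "hey claude", "hey clawed", "hey clog", "hey clo",
--     "hey law", "hey claws", "a claw", "hey clock", "hey claw.",
-- ]
--
-- def check_rolling_buffer(rolling_buffer):
--     for i in range(len(rolling_buffer)):
--         combined = " ".join(rolling_buffer[i:]).lower().strip()
--         for phrase in WAKE_PHRASES:
--             if phrase in combined:
--                 after = combined.split(phrase, 1)[1].strip()
--                 return True, after
--     return False, ""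
-- ===== SOURCE B (Python) =====
-- WAKE_PHRASES = [
--     "hey claw", "hey claude", "hey clawed", "hey clog", "hey clo",
--     "hey law", "hey claws", "a claw", "hey clock", "hey claw.",
-- ]
--
-- def check_rolling_buffer(rolling_buffer):
--     # Join and normalise once: every suffix join is a substring of the full
--     # join, so the first match is always found already at i = 0.
--     combined = " ".join(rolling_buffer).lower().strip()
--     for phrase in WAKE_PHRASES:
--         if phrase in combined:
--             return True, combined.split(phrase, 1)[1].strip()
--     return False, ""
-- ===== Notes on version B (the rewrite author's own statement) =====
-- stated objective: faster
-- what changed: B joins and normalises the buffer once and scans only the wake phrases, dropping A's outer loop over all suffixes of the buffer (which is dead because every suffix join is a substring of the full join).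
import Mathlib
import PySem

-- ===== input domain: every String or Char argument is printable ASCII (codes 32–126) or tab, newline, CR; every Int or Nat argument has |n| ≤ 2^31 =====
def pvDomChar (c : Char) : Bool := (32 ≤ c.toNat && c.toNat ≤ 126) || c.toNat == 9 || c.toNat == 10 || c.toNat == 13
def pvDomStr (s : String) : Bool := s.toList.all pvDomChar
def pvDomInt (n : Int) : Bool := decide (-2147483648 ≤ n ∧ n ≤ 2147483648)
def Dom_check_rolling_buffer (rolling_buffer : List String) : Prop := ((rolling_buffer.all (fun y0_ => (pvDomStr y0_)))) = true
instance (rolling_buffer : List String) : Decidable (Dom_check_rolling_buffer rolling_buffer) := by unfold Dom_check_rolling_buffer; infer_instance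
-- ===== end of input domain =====

-- B joins and normalises the rolling buffer once and scans only the wake phrases;
-- A's outer loop over buffer suffixes is dead because every suffix join is a substring
-- of the full join, so A and B return the same value on every input.


-- the module constant WAKE_PHRASES (shared by both Pythons)
def pvWake : List (List Char) :=
  ["hey claw".toList, "hey claude".toList, "hey clawed".toList, "hey clog".toList,
   "hey clo".toList, "hey law".toList, "hey claws".toList, "a claw".toList,
   "hey clock".toList, "hey claw.".toList]

-- ===== PORT A =====
-- inner loop: 'for phrase in WAKE_PHRASES: if phrase in combined: return True, combined.split(phrase,1)[1].strip()'
-- (splitMax? is never none here since every wake phrase is nonempty, and index 1 always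
--  exists since the phrase occurs in combined, so the getD defaults are never taken)
def pvScanA (combined : List Char) : List (List Char) → Option (List Char)
  | [] => none
  | p :: ps =>
    if PySem.Chars.isIn p combined then
      some (PySem.Chars.strip (PySem.List.pyGetD ((PySem.Chars.splitMax? combined p 1).getD []) 1 []))
    else pvScanA combined ps

-- outer loop 'for i in range(len(rolling_buffer))': recursion over the suffixes
def check_rolling_buffer : List String → Bool × String
  | [] => (false, "")
  | b :: rest =>
    let combined := PySem.Chars.strip (PySem.Chars.lower (PySem.Chars.join [' '] ((b :: rest).map String.toList)))
    match pvScanA combined pvWake with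
    | some after => (true, String.ofList after)
    | none => check_rolling_buffer rest

-- ===== PORT B =====
def check_rolling_buffer_alt (rolling_buffer : List String) : Bool × String :=
  let combined := PySem.Chars.strip (PySem.Chars.lower (PySem.Chars.join [' '] (rolling_buffer.map String.toList)))
  match pvWake.find? (fun p => PySem.Chars.isIn p combined) with
  | some p => (true, String.ofList (PySem.Chars.strip (PySem.List.pyGetD ((PySem.Chars.splitMax? combined p 1).getD []) 1 [])))
  | none => (false, "")

-- ===== PRECONDITION & SPEC =====
def Spec_check_rolling_buffer (rolling_buffer : List String) (out : Bool × String) : Prop := out = check_rolling_buffer_alt rolling_buffer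
instance (rolling_buffer : List String) (out : Bool × String) : Decidable (Spec_check_rolling_buffer rolling_buffer out) := by unfold Spec_check_rolling_buffer; infer_instance

-- ===== CLAIM (what is proved, stated in full; the proofs are below) =====
def Claim_equal_check_rolling_buffer : Prop := ∀ (rolling_buffer : List String), Dom_check_rolling_buffer rolling_buffer → Spec_check_rolling_buffer rolling_buffer (check_rolling_buffer rolling_buffer)

-- ===== LEMMAS AND PROOFS =====

-- A's inner loop is first-match over the wake phrases
theorem pvScanA_eq_find? (combined : List Char) (ps : List (List Char)) :
    pvScanA combined ps =
      (ps.find? (fun p => PySem.Chars.isIn p combined)).map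
        (fun p => PySem.Chars.strip (PySem.List.pyGetD ((PySem.Chars.splitMax? combined p 1).getD []) 1 [])) := by
  induction ps with
  | nil => rfl
  | cons p ps ih =>
    by_cases h : PySem.Chars.isIn p combined = true
    · simp [pvScanA, List.find?, h]
    · simp only [Bool.not_eq_true] at h
      simp [pvScanA, List.find?, h, ih]

-- an infix starting with a non-space character survives dropWhile isspace
theorem pvInfix_dropWhile (p t : List Char) (c0 : Char)
    (h0 : p.head? = some c0) (hs : PySem.Chars.isspace c0 = false)
    (h : p <:+: t) : p <:+: t.dropWhile PySem.Chars.isspace := by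
  induction t with
  | nil =>
    have := List.eq_nil_of_infix_nil h
    subst this; simp at h0
  | cons c t ih =>
    by_cases hc : PySem.Chars.isspace c = true
    · rw [List.dropWhile_cons_of_pos hc]
      rcases (List.infix_cons_iff).1 h with hpre | hinf
      · -- p is a prefix of c :: t, so its head c0 would be the space c
        cases p with
        | nil => simp at h0
        | cons x xs =>
          have hx : x = c := (List.cons_prefix_cons.1 hpre).1
          simp only [List.head?_cons, Option.some.injEq] at h0
          rw [← h0, hx] at hs
          simp [hs] at hc
      · exact ih hinf
    · rw [List.dropWhile_cons_of_neg hc]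
      exact h

-- an infix with non-space first and last characters survives strip
theorem pvInfix_strip (p t : List Char) (c0 c1 : Char)
    (h0 : p.head? = some c0) (hs0 : PySem.Chars.isspace c0 = false)
    (h1 : p.getLast? = some c1) (hs1 : PySem.Chars.isspace c1 = false)
    (h : p <:+: t) : p <:+: PySem.Chars.strip t := by
  have hl : p <:+: PySem.Chars.lstrip t := by
    unfold PySem.Chars.lstrip
    exact pvInfix_dropWhile p t c0 h0 hs0 h
  unfold PySem.Chars.strip PySem.Chars.rstrip
  rw [← List.reverse_infix, List.reverse_reverse]
  have hrev : p.reverse <:+: (PySem.Chars.lstrip t).reverse := List.reverse_infix.2 hl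
  have h0r : p.reverse.head? = some c1 := by rw [List.head?_reverse]; exact h1
  exact pvInfix_dropWhile p.reverse (PySem.Chars.lstrip t).reverse c1 h0r hs1 hrev

-- strip t is an infix of t
theorem pvStrip_infix (t : List Char) : PySem.Chars.strip t <:+: t := by
  have h1 : PySem.Chars.lstrip t <:+ t := List.dropWhile_suffix _
  have h2 : PySem.Chars.strip t <+: PySem.Chars.lstrip t := by
    unfold PySem.Chars.strip PySem.Chars.rstrip
    have h3 : List.dropWhile PySem.Chars.isspace (PySem.Chars.lstrip t).reverse
        <:+ (PySem.Chars.lstrip t).reverse := List.dropWhile_suffix _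
    have := (List.reverse_prefix).2 h3
    rwa [List.reverse_reverse] at this
  exact h2.isInfix.trans h1.isInfix

-- every wake phrase starts and ends with a non-space character
theorem pvWake_ok : ∀ p ∈ pvWake,
    p.head?.any (fun c => !PySem.Chars.isspace c) = true ∧
    p.getLast?.any (fun c => !PySem.Chars.isspace c) = true := by decide

-- the normalised full join contains every wake phrase the normalised tail join contains
theorem pvMono (p : List Char) (hp : p ∈ pvWake) (b : String) (rest : List String)
    (h : p <:+: PySem.Chars.strip (PySem.Chars.lower (PySem.Chars.join [' '] (rest.map String.toList)))) :
    p <:+: PySem.Chars.strip (PySem.Chars.lower (PySem.Chars.join [' '] ((b :: rest).map String.toList))) := by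
  obtain ⟨hh, hl⟩ := pvWake_ok p hp
  cases hhd : p.head? with
  | none => rw [hhd] at hh; simp [Option.any] at hh
  | some c0 =>
  cases hlt : p.getLast? with
  | none => rw [hlt] at hl; simp [Option.any] at hl
  | some c1 =>
  rw [hhd] at hh; rw [hlt] at hl
  simp only [Option.any_some, Bool.not_eq_true'] at hh hl
  -- p is an infix of the un-stripped lowered tail join
  have h1 : p <:+: PySem.Chars.lower (PySem.Chars.join [' '] (rest.map String.toList)) :=
    h.trans (pvStrip_infix _)
  -- the lowered tail join is an infix of the lowered full join
  have h2 : PySem.Chars.lower (PySem.Chars.join [' '] (rest.map String.toList))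
      <:+: PySem.Chars.lower (PySem.Chars.join [' '] ((b :: rest).map String.toList)) := by
    cases rest with
    | nil =>
      simp [PySem.Chars.join, PySem.Chars.lower, List.intercalate]
    | cons r rs =>
      have hj : PySem.Chars.join [' '] ((b :: r :: rs).map String.toList)
          = b.toList ++ [' '] ++ PySem.Chars.join [' '] ((r :: rs).map String.toList) := by
        simp only [List.map_cons]
        exact PySem.Chars.join_cons_cons _ _ _ _
      rw [hj]
      unfold PySem.Chars.lower
      rw [List.map_append]
      exact (List.suffix_append _ _).isInfix
  exact pvInfix_strip p _ c0 c1 hhd hh hlt hl (h1.trans h2)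

theorem pvMain (buf : List String) : check_rolling_buffer buf = check_rolling_buffer_alt buf := by
  induction buf with
  | nil => decide
  | cons b rest ih =>
    cases hf : pvWake.find? (fun p => PySem.Chars.isIn p
        (PySem.Chars.strip (PySem.Chars.lower (PySem.Chars.join [' '] (b.toList :: rest.map String.toList))))) with
    | some p =>
      simp [check_rolling_buffer, check_rolling_buffer_alt, pvScanA_eq_find?, hf]
    | none =>
      have hrest : pvWake.find? (fun p => PySem.Chars.isIn p
          (PySem.Chars.strip (PySem.Chars.lower (PySem.Chars.join [' '] (rest.map String.toList))))) = none := by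
        rw [List.find?_eq_none] at hf ⊢
        intro p hp hcon
        apply hf p hp
        rw [PySem.Chars.isIn_iff_infix] at hcon ⊢
        have := pvMono p hp b rest hcon
        simpa using this
      have hBfull : check_rolling_buffer_alt (b :: rest) = (false, "") := by
        simp [check_rolling_buffer_alt, hf]
      have hBrest : check_rolling_buffer_alt rest = (false, "") := by
        simp [check_rolling_buffer_alt, hrest]
      have hA : check_rolling_buffer (b :: rest) = check_rolling_buffer rest := by
        simp [check_rolling_buffer, pvScanA_eq_find?, hf]
      rw [hA, ih, hBrest, hBfull]

-- ===== VERDICT (by name: the statement is the Claim_ definition above) =====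
theorem check_rolling_buffer_spec : Claim_equal_check_rolling_buffer := by
  intro buf _
  show check_rolling_buffer buf = check_rolling_buffer_alt buf
  exact pvMain buf
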